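-- pv_equiv track=rewrite | github.com/ZongyuWu97/LeetCode | UnionFind/Checking_Existence_of_Edge_Length_Limited_Paths.py | distanceLimitedPathsExist
-- ===== SOURCE A (Python) =====
-- from typing import List
--
-- def distanceLimitedPathsExist(n: int, edgeList: List[List[int]], queries: List[List[int]]) -> List[bool]:
--     UF = {}
--
--     def find(x):
--         if not x in UF:
--             UF[x] = x
--
--         if x != UF[x]:
--             UF[x] = find(UF[x])
--         return UF[x]
--
--     def union(x, y):
--         rootX = find(x)
--         rootY = find(y)
--
--         if rootX != rootY:
--             UF[rootX] = rootY
--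
--     edgeList.sort(key=lambda x: x[2])
--     queries = sorted((limit, p, q, idx)
--                      for idx, (p, q, limit) in enumerate(queries))
--     res = [False] * len(queries)
--
--     i, E = 0, len(edgeList)
--     for limit, p, q, idx in queries:
--         while i < E and edgeList[i][2] < limit:
--             union(edgeList[i][0], edgeList[i][1])
--             i += 1
--
--         res[idx] = find(p) == find(q)
--     return res
-- ===== SOURCE B (Python) =====
-- from typing import List
--
--
-- def distanceLimitedPathsExist(n: int, edgeList: List[List[int]], queries: List[List[int]]) -> List[bool]:
--     # Simpler online strategy: sort edgeList by weight (same in-place side effect),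
--     # then answer each query independently, in original order, with a fresh union-find.
--     edgeList.sort(key=lambda x: x[2])
--     res = []
--     for qr in queries:
--         p, q, limit = qr[0], qr[1], qr[2]
--         UF = {}
--
--         def find(x):
--             if not x in UF:
--                 UF[x] = x
--             if x != UF[x]:
--                 UF[x] = find(UF[x])
--             return UF[x]
--
--         def union(x, y):
--             rootX = find(x)
--             rootY = find(y)
--             if rootX != rootY:
--                 UF[rootX] = rootY
--
--         for e in edgeList:
--             if e[2] < limit:
--                 union(e[0], e[1])
--         res.append(find(p) == find(q))
--     return res
-- ===== Notes on version B (the rewrite author's own statement) =====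
-- stated objective: simpler
-- what changed: B drops A's offline sweep (sorting queries by limit and advancing one shared union-find with an edge pointer): it sorts edgeList once (same in-place side effect) and answers each query independently, in original order, by building a fresh union-find from the edges of weight < limit.
import Mathlib
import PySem

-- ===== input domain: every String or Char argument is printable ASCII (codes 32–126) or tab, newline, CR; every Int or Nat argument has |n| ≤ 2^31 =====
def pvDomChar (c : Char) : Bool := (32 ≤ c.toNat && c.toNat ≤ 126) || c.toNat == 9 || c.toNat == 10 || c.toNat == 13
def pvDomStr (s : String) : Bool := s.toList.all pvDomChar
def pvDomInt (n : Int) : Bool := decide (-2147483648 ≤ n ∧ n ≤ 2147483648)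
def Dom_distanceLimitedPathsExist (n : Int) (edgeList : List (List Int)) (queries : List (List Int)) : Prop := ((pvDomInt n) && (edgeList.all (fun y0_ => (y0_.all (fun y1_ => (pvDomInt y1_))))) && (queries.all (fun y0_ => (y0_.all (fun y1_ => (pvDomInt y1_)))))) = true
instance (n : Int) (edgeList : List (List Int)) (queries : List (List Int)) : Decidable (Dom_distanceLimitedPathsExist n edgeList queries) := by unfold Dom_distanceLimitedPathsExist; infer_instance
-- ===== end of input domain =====

-- B answers each query independently with a fresh union-find instead of A's offline
-- sorted-queries sweep (objective: simpler).  Both Pythons sort edgeList in place by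
-- weight; the theorems below are about the RETURN value only (the mutation is identical).

-- ===== PORT A =====
-- shared union-find helper, identical in both Pythons (dict UF; find with path
-- compression, union by re-rooting); fuel only makes the recursion total — on every
-- state the ports reach, the parent chain is shorter than the fuel supplied
def pvFind : Nat → PySem.Dict Int Int → Int → Int × PySem.Dict Int Int
  | 0, d, x => (x, d)
  | fuel+1, d, x =>
    let d1 := if d.contains x then d else d.insert x x
    let p := d1.getD x x
    if x = p then (p, d1)
    else
      let r := pvFind fuel d1 p
      (r.1, r.2.insert x r.1)

def pvUnion (fuel : Nat) (d : PySem.Dict Int Int) (x y : Int) : PySem.Dict Int Int :=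
  let fx := pvFind fuel d x
  let fy := pvFind fuel fx.2 y
  if fx.1 ≠ fy.1 then fy.2.insert fx.1 fy.1 else fy.2

-- Python tuple comparison (limit, p, q, idx) is lexicographic
def pvKey4 (t : Int × Int × Int × Int) : Lex (Int × Lex (Int × Lex (Int × Int))) :=
  toLex (t.1, toLex (t.2.1, toLex (t.2.2.1, t.2.2.2)))

-- 'while i < E and edgeList[i][2] < limit: union(edgeList[i][0], edgeList[i][1]); i += 1'
def pvWhileA (fuel : Nat) (el : List (List Int)) (limit : Int) (i : Nat) (d : PySem.Dict Int Int) :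
    Nat × PySem.Dict Int Int :=
  if h : i < el.length ∧ PySem.List.pyGetD (el.getD i []) 2 0 < limit then
    pvWhileA fuel el limit (i+1)
      (pvUnion fuel d (PySem.List.pyGetD (el.getD i []) 0 0) (PySem.List.pyGetD (el.getD i []) 1 0))
  else (i, d)
  termination_by el.length - i
  decreasing_by omega

def distanceLimitedPathsExist (n : Int) (edgeList : List (List Int)) (queries : List (List Int)) : List Bool :=
  let el := PySem.List.sorted edgeList (fun e => PySem.List.pyGetD e 2 0)
  let qs := PySem.List.sorted
    ((PySem.List.enumerate queries).map (fun t =>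
      match t.2 with
      | [p, q, limit] => (limit, p, q, t.1)
      | _ => (0, 0, 0, t.1)))
    pvKey4
  let fuel := el.length + 1
  let st := qs.foldl
    (fun (st : Nat × PySem.Dict Int Int × List Bool) t =>
      let s := pvWhileA fuel el t.1 st.1 st.2.1
      let fp := pvFind fuel s.2 t.2.1
      let fq := pvFind fuel fp.2 t.2.2.1
      (s.1, fq.2, st.2.2.set t.2.2.2.toNat (fp.1 == fq.1)))
    (0, PySem.Dict.empty, List.replicate qs.length false)
  st.2.2

-- ===== PORT B =====
def distanceLimitedPathsExist_alt (n : Int) (edgeList : List (List Int)) (queries : List (List Int)) : List Bool :=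
  let el := PySem.List.sorted edgeList (fun e => PySem.List.pyGetD e 2 0)
  let fuel := el.length + 1
  queries.foldl
    (fun res qr =>
      let p := PySem.List.pyGetD qr 0 0
      let q := PySem.List.pyGetD qr 1 0
      let limit := PySem.List.pyGetD qr 2 0
      let d := el.foldl
        (fun d e =>
          if PySem.List.pyGetD e 2 0 < limit then
            pvUnion fuel d (PySem.List.pyGetD e 0 0) (PySem.List.pyGetD e 1 0)
          else d)
        PySem.Dict.empty
      let fp := pvFind fuel d p
      let fq := pvFind fuel fp.2 q
      res ++ [fp.1 == fq.1])
    []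

-- ===== PRECONDITION & SPEC =====
-- Pre_ = exactly the inputs Python A returns on: every edge needs indices 0,1,2
-- (IndexError otherwise) and every query must unpack as (p, q, limit) (ValueError otherwise).
def Pre_distanceLimitedPathsExist (n : Int) (edgeList : List (List Int)) (queries : List (List Int)) : Prop :=
  (∀ e ∈ edgeList, 3 ≤ e.length) ∧ (∀ q ∈ queries, q.length = 3)
instance (n : Int) (edgeList : List (List Int)) (queries : List (List Int)) : Decidable (Pre_distanceLimitedPathsExist n edgeList queries) := by unfold Pre_distanceLimitedPathsExist; infer_instance

def pvWitness_distanceLimitedPathsExist : Int × List (List Int) × List (List Int) :=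
  (3, [[0, 1, 2], [1, 2, 4]], [[0, 2, 5], [0, 2, 1]])

def Spec_distanceLimitedPathsExist (n : Int) (edgeList : List (List Int)) (queries : List (List Int)) (out : List Bool) : Prop := out = distanceLimitedPathsExist_alt n edgeList queries
instance (n : Int) (edgeList : List (List Int)) (queries : List (List Int)) (out : List Bool) : Decidable (Spec_distanceLimitedPathsExist n edgeList queries out) := by unfold Spec_distanceLimitedPathsExist; infer_instance

-- ===== CLAIM (what is proved, stated in full; the proofs are below) =====
def Claim_equal_distanceLimitedPathsExist : Prop := ∀ (n : Int) (edgeList : List (List Int)) (queries : List (List Int)), Dom_distanceLimitedPathsExist n edgeList queries → Pre_distanceLimitedPathsExist n edgeList queries → Spec_distanceLimitedPathsExist n edgeList queries (distanceLimitedPathsExist n edgeList queries)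

-- ===== LEMMAS AND PROOFS =====

-- abstract view of a union-find dict: parent function, its iterates, and the invariant
-- 'f is the root map, every chain reaches its root within k steps'
def pvParent (d : PySem.Dict Int Int) (x : Int) : Int := d.getD x x

def pvIter : Nat → PySem.Dict Int Int → Int → Int
  | 0, _, x => x
  | j+1, d, x => pvIter j d (pvParent d x)

def UFInv (d : PySem.Dict Int Int) (f : Int → Int) (k : Nat) : Prop :=
  ∀ x, pvIter k d x = f x ∧ pvParent d (f x) = f x

-- effect of union(x, y) on the root map
def pvApp (f : Int → Int) (u v : Int) : Int → Int :=
  fun z => if f z = f u then f v else f z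

-- edge accessors (index 2 / 0 / 1 with default, as the ports read them)
def pvW (e : List Int) : Int := PySem.List.pyGetD e 2 0
def pvE0 (e : List Int) : Int := PySem.List.pyGetD e 0 0
def pvE1 (e : List Int) : Int := PySem.List.pyGetD e 1 0

-- root map after unioning a list of edges
def pvFEdges (es : List (List Int)) (f : Int → Int) : Int → Int :=
  es.foldl (fun f e => pvApp f (pvE0 e) (pvE1 e)) f

-- the answer both programs give to query (p, q, limit) against sorted edges el
def pvAns (el : List (List Int)) (limit p q : Int) : Bool :=
  (pvFEdges (el.takeWhile (fun e => decide (pvW e < limit))) id p ==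
   pvFEdges (el.takeWhile (fun e => decide (pvW e < limit))) id q)

theorem pvIter_succ' (j : Nat) (d : PySem.Dict Int Int) (x : Int) :
    pvIter (j+1) d x = pvParent d (pvIter j d x) := by
  induction j generalizing x with
  | zero => rfl
  | succ j ih => simp only [pvIter]; exact ih _

theorem pvIter_fix (j : Nat) (d : PySem.Dict Int Int) (r : Int) (h : pvParent d r = r) :
    pvIter j d r = r := by
  induction j with
  | zero => rfl
  | succ j ih => simp only [pvIter, h, ih]

theorem pvIter_congr (j : Nat) (d d' : PySem.Dict Int Int) (x : Int)
    (h : ∀ y, pvParent d y = pvParent d' y) : pvIter j d x = pvIter j d' x := by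
  induction j generalizing x with
  | zero => rfl
  | succ j ih => simp only [pvIter, h]; exact ih _

theorem UFInv_congr {d d' : PySem.Dict Int Int} {f : Int → Int} {k : Nat}
    (h : ∀ y, pvParent d y = pvParent d' y) (hI : UFInv d f k) : UFInv d' f k := by
  intro x
  refine ⟨?_, ?_⟩
  · rw [← pvIter_congr k d d' x h]; exact (hI x).1
  · rw [← h]; exact (hI x).2

theorem UFInv_parent {d : PySem.Dict Int Int} {f : Int → Int} {k : Nat}
    (hI : UFInv d f k) (x : Int) : f (pvParent d x) = f x := by
  have h1 : pvIter (k+1) d x = f x := by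
    rw [pvIter_succ', (hI x).1]; exact (hI x).2
  have h2 : pvIter (k+1) d x = pvIter k d (pvParent d x) := rfl
  rw [← (hI (pvParent d x)).1, ← h2, h1]

theorem UFInv_idem {d : PySem.Dict Int Int} {f : Int → Int} {k : Nat}
    (hI : UFInv d f k) (x : Int) : f (f x) = f x := by
  have := (hI (f x)).1
  rw [pvIter_fix k d (f x) (hI x).2] at this
  exact this.symm

theorem UFInv_succ {d : PySem.Dict Int Int} {f : Int → Int} {k : Nat}
    (hI : UFInv d f k) : UFInv d f (k+1) := by
  intro x
  refine ⟨?_, (hI x).2⟩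
  rw [pvIter_succ', (hI x).1]; exact (hI x).2

theorem pvParent_insert (d : PySem.Dict Int Int) (a b y : Int) :
    pvParent (d.insert a b) y = if y = a then b else pvParent d y := by
  simp only [pvParent, PySem.Dict.getD_insert]

theorem UFInv_empty : UFInv PySem.Dict.empty id 0 := by
  intro x; exact ⟨rfl, by simp [pvParent, PySem.Dict.getD_empty]⟩

-- path compression preserves the invariant
theorem UFInv_compress {d : PySem.Dict Int Int} {f : Int → Int} {k : Nat}
    (hI : UFInv d f k) (x : Int) : UFInv (d.insert x (f x)) f k := by
  have hroot : ∀ y, pvParent (d.insert x (f x)) (f y) = f y := by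
    intro y
    rw [pvParent_insert]
    split
    · next h => rw [← h, UFInv_idem hI y]
    · exact (hI y).2
  have key : ∀ j y, pvIter j d y = f y → pvIter j (d.insert x (f x)) y = f y := by
    intro j
    induction j with
    | zero => intro y hy; exact hy
    | succ j ih =>
      intro y hy
      by_cases hyx : y = x
      · subst hyx
        have hp2 : pvParent (d.insert y (f y)) y = f y := by rw [pvParent_insert, if_pos rfl]
        simp only [pvIter, hp2]
        have hfix : pvIter j d (f y) = f y := pvIter_fix j d (f y) (hI y).2
        have h2 := ih (f y) (by rw [hfix]; exact (UFInv_idem hI y).symm)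
        rw [UFInv_idem hI y] at h2
        exact h2
      · simp only [pvIter]
        rw [pvParent_insert, if_neg hyx]
        have hy' : pvIter j d (pvParent d y) = f (pvParent d y) := by
          rw [UFInv_parent hI y]; exact hy
        rw [ih (pvParent d y) hy', UFInv_parent hI y]
  intro y
  exact ⟨key k y (hI y).1, hroot y⟩

theorem pvParent_guard (d : PySem.Dict Int Int) (x y : Int) :
    pvParent (if d.contains x then d else d.insert x x) y = pvParent d y := by
  by_cases hc : d.contains x
  · simp [hc]
  · simp only [hc, if_false, Bool.false_eq_true]
    rw [pvParent_insert]
    split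
    · next h =>
      subst h
      simp only [pvParent]
      rw [PySem.Dict.getD_of_not_contains]
      simpa using hc
    · rfl

theorem pvFind_spec : ∀ (j fuel : Nat) (d : PySem.Dict Int Int) (f : Int → Int) (k : Nat) (x : Int),
    UFInv d f k → pvIter j d x = f x → j < fuel →
    (pvFind fuel d x).1 = f x ∧ UFInv (pvFind fuel d x).2 f k := by
  intro j
  induction j with
  | zero =>
    intro fuel d f k x hI hx hj
    -- f x = x and x is a root, so the first branch fires
    match fuel, hj with
    | fuel+1, _ =>
      have hfx : f x = x := hx.symm
      have hroot : pvParent d x = x := by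
        have := (hI x).2; rw [hfx] at this; exact this
      simp only [pvFind]
      have hp : (if d.contains x then d else d.insert x x).getD x x = x := by
        have := pvParent_guard d x x
        simp only [pvParent] at this
        rw [this]; exact hroot
      rw [hp, if_pos rfl]
      exact ⟨hfx.symm, UFInv_congr (fun y => (pvParent_guard d x y).symm) hI⟩
  | succ j ih =>
    intro fuel d f k x hI hx hj
    match fuel, hj with
    | fuel+1, hj =>
      set d1 := if d.contains x then d else d.insert x x with hd1
      have hpar : ∀ y, pvParent d1 y = pvParent d y := fun y => pvParent_guard d x y
      have hI1 : UFInv d1 f k := UFInv_congr (fun y => (hpar y).symm) hI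
      by_cases hrt : pvParent d x = x
      · -- already a root: the branch test succeeds
        have hfx : f x = x := by
          rw [← hx, pvIter_fix (j+1) d x hrt]
        simp only [pvFind]
        rw [← hd1]
        have hp : d1.getD x x = x := by
          have := hpar x; simp only [pvParent] at this; rw [this]; exact hrt
        rw [hp, if_pos rfl]
        exact ⟨hfx.symm, hI1⟩
      · -- recursive case
        have hp : d1.getD x x = pvParent d x := by
          have := hpar x; simp only [pvParent] at this; exact this
        have hxne : ¬ x = d1.getD x x := by rw [hp]; exact fun h => hrt h.symm
        have hfp : f (pvParent d x) = f x := UFInv_parent hI x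
        have hx' : pvIter j d1 (pvParent d x) = f (pvParent d x) := by
          rw [pvIter_congr j d1 d _ hpar, hfp]
          exact hx
        have hrec := ih fuel d1 f k (pvParent d x) hI1 hx' (by omega)
        simp only [pvFind]
        rw [← hd1, if_neg (by rw [hp] at hxne ⊢; exact hxne)]
        simp only [hp]
        constructor
        · rw [hrec.1, hfp]
        · rw [hrec.1, hfp]
          exact UFInv_compress hrec.2 x

-- re-rooting f x under f y merges the two classes
theorem UFInv_link {d2 : PySem.Dict Int Int} {f : Int → Int} {k : Nat}
    (hI : UFInv d2 f k) (x y : Int) (hne : f x ≠ f y) :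
    UFInv (d2.insert (f x) (f y)) (pvApp f x y) (k+1) := by
  have hrootx : pvParent d2 (f x) = f x := (hI x).2
  have hrooty : pvParent d2 (f y) = f y := (hI y).2
  have hpar : ∀ w, pvParent (d2.insert (f x) (f y)) w = if w = f x then f y else pvParent d2 w :=
    fun w => pvParent_insert d2 (f x) (f y) w
  have hroot' : ∀ z, pvParent (d2.insert (f x) (f y)) (pvApp f x y z) = pvApp f x y z := by
    intro z
    simp only [pvApp]
    by_cases hz : f z = f x
    · simp only [hz]
      rw [hpar, if_neg (fun h => hne h.symm)]
      exact hrooty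
    · simp only [if_neg hz]
      rw [hpar, if_neg hz]
      exact (hI z).2
  have hfyfix : ∀ j, pvIter j (d2.insert (f x) (f y)) (f y) = f y := by
    intro j
    apply pvIter_fix
    rw [hpar, if_neg (fun h => hne h.symm)]
    exact hrooty
  have key : ∀ j z, pvIter j d2 z = f z → pvIter (j+1) (d2.insert (f x) (f y)) z = pvApp f x y z := by
    intro j
    induction j with
    | zero =>
      intro z hz
      simp only [pvIter] at hz   -- hz : z = f z
      simp only [pvIter]
      rw [hpar]
      by_cases hzx : z = f x
      · rw [if_pos hzx]
        have hfz : f z = f x := by rw [← hz]; exact hzx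
        simp only [pvApp, if_pos hfz]
      · rw [if_neg hzx]
        have hfzx : ¬ f z = f x := by rw [← hz]; exact hzx
        have h1 : pvParent d2 z = pvParent d2 (f z) := by rw [← hz]
        rw [h1, (hI z).2]
        simp only [pvApp, if_neg hfzx]
    | succ j ih =>
      intro z hz
      show pvIter (j+1) (d2.insert (f x) (f y)) (pvParent (d2.insert (f x) (f y)) z) = pvApp f x y z
      rw [hpar]
      by_cases hzx : z = f x
      · rw [if_pos hzx]
        rw [hfyfix]
        have hfz : f z = f x := by rw [hzx]; exact UFInv_idem hI x
        simp only [pvApp, if_pos hfz]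
      · rw [if_neg hzx]
        by_cases hrz : pvParent d2 z = z
        · have hfz : f z = z := by rw [← hz, pvIter_fix (j+1) d2 z hrz]
          rw [hrz]
          have hroot2 : pvParent (d2.insert (f x) (f y)) z = z := by
            rw [hpar, if_neg hzx]; exact hrz
          rw [pvIter_fix (j+1) _ z hroot2]
          have hfzx : ¬ f z = f x := by rw [hfz]; exact hzx
          simp only [pvApp, if_neg hfzx]
          exact hfz.symm
        · have hz' : pvIter j d2 (pvParent d2 z) = f (pvParent d2 z) := by
            rw [UFInv_parent hI z]
            exact hz
          rw [ih (pvParent d2 z) hz']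
          simp only [pvApp, UFInv_parent hI z]
  refine fun z => ⟨key k z (hI z).1, hroot' z⟩

theorem pvUnion_spec {d : PySem.Dict Int Int} {f : Int → Int} {k : Nat} (fuel : Nat) (x y : Int)
    (hI : UFInv d f k) (hk : k < fuel) :
    UFInv (pvUnion fuel d x y) (pvApp f x y) (k+1) := by
  have hx := pvFind_spec k fuel d f k x hI (hI x).1 hk
  have hy := pvFind_spec k fuel (pvFind fuel d x).2 f k y hx.2 (hx.2 y).1 hk
  have e : pvUnion fuel d x y =
      (if (pvFind fuel d x).1 ≠ (pvFind fuel (pvFind fuel d x).2 y).1 then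
        (pvFind fuel (pvFind fuel d x).2 y).2.insert (pvFind fuel d x).1
          (pvFind fuel (pvFind fuel d x).2 y).1
      else (pvFind fuel (pvFind fuel d x).2 y).2) := rfl
  rw [e, hx.1, hy.1]
  by_cases hne : f x ≠ f y
  · simp only [if_pos hne]
    exact UFInv_link hy.2 x y hne
  · simp only [if_neg hne]
    rw [not_not] at hne
    have happ : pvApp f x y = f := by
      funext z; simp only [pvApp, hne]; split <;> simp_all
    rw [happ]
    exact UFInv_succ hy.2

theorem pvFoldUnion_spec (fuel : Nat) :
    ∀ (es : List (List Int)) (d : PySem.Dict Int Int) (f : Int → Int) (k : Nat),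
    UFInv d f k → k + es.length < fuel →
    UFInv (es.foldl (fun d e => pvUnion fuel d (pvE0 e) (pvE1 e)) d) (pvFEdges es f) (k + es.length) := by
  intro es
  induction es with
  | nil => intro d f k hI _; simpa [pvFEdges] using hI
  | cons e es ih =>
    intro d f k hI hfuel
    have h1 := pvUnion_spec fuel (pvE0 e) (pvE1 e) hI (by omega)
    have h2 := ih _ _ (k+1) h1 (by simp at hfuel ⊢; omega)
    have h3 : (k+1) + es.length = k + (e :: es).length := by simp [List.length_cons]; omega
    rw [h3] at h2
    exact h2

theorem pvTakeWhile_eq_take (P : List Int → Bool) :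
    ∀ (el : List (List Int)) (i : Nat), i ≤ el.length →
    (∀ j, j < i → P (el.getD j []) = true) →
    (i = el.length ∨ (i < el.length ∧ ¬ P (el.getD i []) = true)) →
    el.takeWhile P = el.take i := by
  intro el
  induction el with
  | nil => intro i _ _ _; simp
  | cons a tl ih =>
    intro i hi h1 h2
    match i with
    | 0 =>
      rcases h2 with h2 | ⟨_, h2⟩
      · simp at h2
      · simp only [List.getD_cons_zero] at h2
        simp only [List.take_zero, List.takeWhile]
        simp [h2]
    | i+1 =>
      have ha : P a = true := h1 0 (by omega)
      simp only [List.takeWhile, ha, List.take_succ_cons]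
      rw [ih i (by simpa using hi) (fun j hj => by simpa using h1 (j+1) (by omega))]
      rcases h2 with h2 | ⟨h, h2⟩
      · left; simpa using h2
      · right; exact ⟨by simpa using h, by simpa using h2⟩

theorem pvFilter_eq_takeWhile (L : Int) :
    ∀ (el : List (List Int)), el.Pairwise (fun a b => pvW a ≤ pvW b) →
    el.filter (fun e => decide (pvW e < L)) = el.takeWhile (fun e => decide (pvW e < L)) := by
  intro el
  induction el with
  | nil => simp
  | cons a tl ih =>
    intro hp
    rcases List.pairwise_cons.mp hp with ⟨ha, htl⟩
    by_cases h : pvW a < L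
    · rw [List.filter_cons, List.takeWhile_cons]
      simp only [decide_eq_true h, if_true]
      rw [ih htl]
    · rw [List.filter_cons, List.takeWhile_cons]
      simp only [decide_eq_false h, if_false, Bool.false_eq_true]
      rw [List.filter_eq_nil_iff.mpr]
      intro b hb
      simp only [decide_eq_true_eq]
      have := ha b hb
      omega

theorem pvWhileA_spec (el : List (List Int)) (limit : Int) :
    ∀ (m i : Nat) (d : PySem.Dict Int Int), el.length - i ≤ m → i ≤ el.length →
    (∀ j, j < i → pvW (el.getD j []) < limit) →
    UFInv d (pvFEdges (el.take i) id) i →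
    (el.take (pvWhileA (el.length+1) el limit i d).1 = el.takeWhile (fun e => decide (pvW e < limit)) ∧
     (pvWhileA (el.length+1) el limit i d).1 ≤ el.length ∧
     UFInv (pvWhileA (el.length+1) el limit i d).2
       (pvFEdges (el.take (pvWhileA (el.length+1) el limit i d).1) id)
       (pvWhileA (el.length+1) el limit i d).1) := by
  intro m
  induction m with
  | zero =>
    intro i d hm hi h1 hI
    have hieq : i = el.length := by omega
    rw [pvWhileA]
    rw [dif_neg (fun h => absurd h.1 (by omega))]
    refine ⟨?_, hi, hI⟩
    exact (pvTakeWhile_eq_take _ el i hi (fun j hj => by simpa using h1 j hj) (Or.inl hieq)).symm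
  | succ m ih =>
    intro i d hm hi h1 hI
    rw [pvWhileA]
    by_cases hc : i < el.length ∧ PySem.List.pyGetD (el.getD i []) 2 0 < limit
    · rw [dif_pos hc]
      have hIu : UFInv
          (pvUnion (el.length+1) d (PySem.List.pyGetD (el.getD i []) 0 0) (PySem.List.pyGetD (el.getD i []) 1 0))
          (pvFEdges (el.take (i+1)) id) (i+1) := by
        have hu := pvUnion_spec (el.length+1)
          (PySem.List.pyGetD (el.getD i []) 0 0) (PySem.List.pyGetD (el.getD i []) 1 0) hI (by omega)
        have htake : el.take (i+1) = el.take i ++ [el.getD i []] := by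
          rw [List.take_add_one]
          congr 1
          rw [List.getElem?_eq_getElem hc.1]
          simp [List.getD, List.getElem?_eq_getElem hc.1]
        rw [htake]
        have hfe : pvFEdges (el.take i ++ [el.getD i []]) id
            = pvApp (pvFEdges (el.take i) id) (pvE0 (el.getD i [])) (pvE1 (el.getD i [])) := by
          simp [pvFEdges, List.foldl_append]
        rw [hfe]
        exact hu
      have := ih (i+1)
        (pvUnion (el.length+1) d (PySem.List.pyGetD (el.getD i []) 0 0) (PySem.List.pyGetD (el.getD i []) 1 0))
        (by omega) (by omega)
        (fun j hj => by
          rcases Nat.lt_or_ge j i with h | h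
          · exact h1 j h
          · have : j = i := by omega
            subst this
            exact hc.2)
        hIu
      exact this
    · rw [dif_neg hc]
      have h2 : i = el.length ∨ (i < el.length ∧ ¬ (decide (pvW (el.getD i []) < limit)) = true) := by
        rcases Nat.lt_or_ge i el.length with h | h
        · right
          refine ⟨h, ?_⟩
          simp only [decide_eq_true_eq, pvW]
          intro hlt
          exact hc ⟨h, hlt⟩
        · left; omega
      refine ⟨?_, hi, hI⟩
      exact (pvTakeWhile_eq_take _ el i hi (fun j hj => by simpa using h1 j hj) h2).symm

-- the result of A's main fold, entrywise
theorem pvTake_pred (el : List (List Int)) (limit : Int) (s1 : Nat) (hle : s1 ≤ el.length)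
    (h : el.take s1 = el.takeWhile (fun e => decide (pvW e < limit))) :
    ∀ j, j < s1 → pvW (el.getD j []) < limit := by
  intro j hj
  have hjl : j < el.length := lt_of_lt_of_le hj hle
  have hget : el.getD j [] = (el.take s1)[j]'(by simp [List.length_take]; omega) := by
    simp [List.getD_eq_getElem?_getD, List.getElem?_eq_getElem hjl]
  have hmem : el.getD j [] ∈ el.takeWhile (fun e => decide (pvW e < limit)) := by
    rw [← h, hget]
    exact List.getElem_mem _
  simpa using List.mem_takeWhile_imp hmem

theorem pvALoop (el : List (List Int)) :
    ∀ (qs : List (Int × Int × Int × Int)) (i : Nat) (d : PySem.Dict Int Int) (res : List Bool),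
    qs.Pairwise (fun a b => a.1 ≤ b.1) →
    (∀ t ∈ qs, ∀ j, j < i → pvW (el.getD j []) < t.1) →
    i ≤ el.length → UFInv d (pvFEdges (el.take i) id) i →
    (qs.foldl
      (fun (st : Nat × PySem.Dict Int Int × List Bool) t =>
        let s := pvWhileA (el.length+1) el t.1 st.1 st.2.1
        let fp := pvFind (el.length+1) s.2 t.2.1
        let fq := pvFind (el.length+1) fp.2 t.2.2.1
        (s.1, fq.2, st.2.2.set t.2.2.2.toNat (fp.1 == fq.1)))
      (i, d, res)).2.2
    = qs.foldl (fun res t => res.set t.2.2.2.toNat (pvAns el t.1 t.2.1 t.2.2.1)) res := by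
  intro qs
  induction qs with
  | nil => intro i d res _ _ _ _; rfl
  | cons t qs ih =>
    intro i d res hp hpre hi hI
    rcases List.pairwise_cons.mp hp with ⟨hhead, htl⟩
    have hw := pvWhileA_spec el t.1 (el.length - i) i d le_rfl hi
      (fun j hj => hpre t (List.mem_cons_self) j hj) hI
    set s := pvWhileA (el.length+1) el t.1 i d with hsdef
    obtain ⟨htake, hslen, hinv⟩ := hw
    have hf1 := pvFind_spec s.1 (el.length+1) s.2 (pvFEdges (el.take s.1) id) s.1 t.2.1
      hinv (hinv t.2.1).1 (by omega)
    have hf2 := pvFind_spec s.1 (el.length+1) (pvFind (el.length+1) s.2 t.2.1).2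
      (pvFEdges (el.take s.1) id) s.1 t.2.2.1
      hf1.2 (hf1.2 t.2.2.1).1 (by omega)
    simp only [List.foldl_cons]
    rw [ih s.1 (pvFind (el.length+1) (pvFind (el.length+1) s.2 t.2.1).2 t.2.2.1).2
      (res.set t.2.2.2.toNat ((pvFind (el.length+1) s.2 t.2.1).1 ==
        (pvFind (el.length+1) (pvFind (el.length+1) s.2 t.2.1).2 t.2.2.1).1))
      htl
      (fun t' ht' j hj => lt_of_lt_of_le (pvTake_pred el t.1 s.1 hslen htake j hj) (hhead t' ht'))
      hslen hf2.2]
    congr 2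
    rw [hf1.1, hf2.1]
    simp only [pvAns, ← htake]

-- evaluating the accessors on an explicit 3-element query
theorem pvAcc_eval (a b c : Int) :
    pvE0 [a, b, c] = a ∧ pvE1 [a, b, c] = b ∧ pvW [a, b, c] = c := by
  refine ⟨?_, ?_, ?_⟩ <;> simp [pvE0, pvE1, pvW, PySem.List.pyGetD]

theorem pvLen3 (q : List Int) (h : q.length = 3) : q = [pvE0 q, pvE1 q, pvW q] := by
  match q, h with
  | [a, b, c], _ =>
    obtain ⟨h0, h1, h2⟩ := pvAcc_eval a b c
    rw [h0, h1, h2]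

-- B's value: one independent union-find per query
theorem pvB_eq (n : Int) (E Q : List (List Int)) :
    distanceLimitedPathsExist_alt n E Q
      = Q.map (fun q => pvAns (PySem.List.sorted E (fun e => PySem.List.pyGetD e 2 0))
          (pvW q) (pvE0 q) (pvE1 q)) := by
  unfold distanceLimitedPathsExist_alt
  set el := PySem.List.sorted E (fun e => PySem.List.pyGetD e 2 0) with hel
  have hs : el.Pairwise (fun a b => pvW a ≤ pvW b) := by
    have := PySem.List.sorted_pairwise (xs := E) (key := fun e => PySem.List.pyGetD e 2 0)
    exact this
  have hbody : ∀ (res : List Bool) (q : List Int), q ∈ Q →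
      (fun res qr =>
        let p := PySem.List.pyGetD qr 0 0
        let q := PySem.List.pyGetD qr 1 0
        let limit := PySem.List.pyGetD qr 2 0
        let d := el.foldl
          (fun d e =>
            if PySem.List.pyGetD e 2 0 < limit then
              pvUnion (el.length+1) d (PySem.List.pyGetD e 0 0) (PySem.List.pyGetD e 1 0)
            else d)
          PySem.Dict.empty
        let fp := pvFind (el.length+1) d p
        let fq := pvFind (el.length+1) fp.2 q
        res ++ [fp.1 == fq.1]) res q
      = res ++ [pvAns el (pvW q) (pvE0 q) (pvE1 q)] := by
    intro res q hqQ
    set a := pvE0 q with ha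
    set b := pvE1 q with hb
    set c := pvW q with hc
    show (let d := el.foldl
            (fun d e =>
              if PySem.List.pyGetD e 2 0 < c then
                pvUnion (el.length+1) d (PySem.List.pyGetD e 0 0) (PySem.List.pyGetD e 1 0)
              else d)
            PySem.Dict.empty
          let fp := pvFind (el.length+1) d a
          let fq := pvFind (el.length+1) fp.2 b
          res ++ [fp.1 == fq.1])
      = res ++ [pvAns el c a b]
    have hfold : el.foldl
        (fun d e =>
          if PySem.List.pyGetD e 2 0 < c then
            pvUnion (el.length+1) d (PySem.List.pyGetD e 0 0) (PySem.List.pyGetD e 1 0)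
          else d)
        PySem.Dict.empty
      = (el.filter (fun e => decide (pvW e < c))).foldl
          (fun d e => pvUnion (el.length+1) d (pvE0 e) (pvE1 e)) PySem.Dict.empty := by
      have := PySem.List.foldl_ite_eq_foldl_filter (l := el)
        (p := fun e => pvW e < c)
        (f := fun d e => pvUnion (el.length+1) d (pvE0 e) (pvE1 e))
        (init := PySem.Dict.empty)
      rw [← this]
      rfl
    have hflt : (el.filter (fun e => decide (pvW e < c))).length ≤ el.length :=
      List.length_filter_le _ _
    have hIfold := pvFoldUnion_spec (el.length+1) (el.filter (fun e => decide (pvW e < c)))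
      PySem.Dict.empty id 0 UFInv_empty (by omega)
    rw [hfold]
    set dd := (el.filter (fun e => decide (pvW e < c))).foldl
        (fun d e => pvUnion (el.length+1) d (pvE0 e) (pvE1 e)) PySem.Dict.empty
    set F := pvFEdges (el.filter (fun e => decide (pvW e < c))) id with hF
    simp only [Nat.zero_add] at hIfold
    have hf1 := pvFind_spec (el.filter (fun e => decide (pvW e < c))).length (el.length+1)
      dd F _ a hIfold (hIfold a).1 (by omega)
    have hf2 := pvFind_spec (el.filter (fun e => decide (pvW e < c))).length (el.length+1)
      (pvFind (el.length+1) dd a).2 F _ b hf1.2 (hf1.2 b).1 (by omega)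
    show res ++ [(pvFind (el.length+1) dd a).1 == (pvFind (el.length+1) (pvFind (el.length+1) dd a).2 b).1]
      = res ++ [pvAns el c a b]
    rw [hf1.1, hf2.1]
    simp only [pvAns, hF, pvFilter_eq_takeWhile c el hs]
  calc Q.foldl _ [] = Q.foldl (fun res q => res ++ [pvAns el (pvW q) (pvE0 q) (pvE1 q)]) [] := by
        apply PySem.List.foldl_congr_mem
        intro acc x hx
        exact hbody acc x hx
    _ = _ := by
        rw [PySem.List.foldl_append_singleton_eq_map]
        simp

theorem pvFoldlSet_length :
    ∀ (L : List (Int × Int × Int × Int)) (res : List Bool) (gval : Int × Int × Int × Int → Bool),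
    (L.foldl (fun res t => res.set t.2.2.2.toNat (gval t)) res).length = res.length := by
  intro L
  induction L with
  | nil => intro res gval; rfl
  | cons t L ih => intro res gval; simp [List.foldl_cons, ih]

theorem pvFoldlSet (gval : Int × Int × Int × Int → Bool) (val : Nat → Bool) :
    ∀ (L : List (Int × Int × Int × Int)) (res : List Bool),
    (∀ t ∈ L, ∃ k, k < res.length ∧ t.2.2.2 = (k : Int) ∧ gval t = val k) →
    ∀ m, (L.foldl (fun res t => res.set t.2.2.2.toNat (gval t)) res)[m]?
      = if ∃ t ∈ L, t.2.2.2.toNat = m then some (val m) else res[m]? := by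
  intro L
  induction L with
  | nil => intro res _ m; simp
  | cons t L ih =>
    intro res hL m
    obtain ⟨k, hk, hkt, hgv⟩ := hL t List.mem_cons_self
    have hktn : t.2.2.2.toNat = k := by rw [hkt]; simp
    simp only [List.foldl_cons]
    rw [ih (res.set t.2.2.2.toNat (gval t))
      (fun t' ht' => by
        obtain ⟨k', hk', h1, h2⟩ := hL t' (List.mem_cons_of_mem _ ht')
        exact ⟨k', by simpa using hk', h1, h2⟩) m]
    by_cases hmemL : ∃ t' ∈ L, t'.2.2.2.toNat = m
    · rw [if_pos hmemL,
        if_pos (by obtain ⟨t', ht', he⟩ := hmemL; exact ⟨t', List.mem_cons_of_mem _ ht', he⟩)]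
    · rw [if_neg hmemL]
      by_cases hm : m = k
      · subst hm
        rw [if_pos ⟨t, List.mem_cons_self, hktn⟩]
        rw [hktn, List.getElem?_set_self (by omega), hgv]
      · have hset : (res.set t.2.2.2.toNat (gval t))[m]? = res[m]? := by
          rw [List.getElem?_set_ne (by omega)]
        rw [hset, if_neg ?_]
        rintro ⟨t', ht', he⟩
        rcases List.mem_cons.mp ht' with h | h
        · subst h; omega
        · exact hmemL ⟨t', h, he⟩

theorem pvKey4_le (a b : Int × Int × Int × Int) (h : pvKey4 a ≤ pvKey4 b) : a.1 ≤ b.1 := by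
  unfold pvKey4 at h
  rcases Prod.Lex.le_iff.mp h with h | ⟨h, _⟩
  · exact le_of_lt h
  · exact le_of_eq h

theorem pvA_eq (n : Int) (E Q : List (List Int)) (hq : ∀ q ∈ Q, q.length = 3) :
    distanceLimitedPathsExist n E Q
      = Q.map (fun q => pvAns (PySem.List.sorted E (fun e => PySem.List.pyGetD e 2 0))
          (pvW q) (pvE0 q) (pvE1 q)) := by
  unfold distanceLimitedPathsExist
  set el := PySem.List.sorted E (fun e => PySem.List.pyGetD e 2 0) with hel
  have hs : el.Pairwise (fun a b => pvW a ≤ pvW b) :=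
    PySem.List.sorted_pairwise (xs := E) (key := fun e => PySem.List.pyGetD e 2 0)
  set φ : Int × List Int → Int × Int × Int × Int := fun t =>
    (match t.2 with
     | [p, q, limit] => (limit, p, q, t.1)
     | _ => (0, 0, 0, t.1)) with hφ
  set qs4 := PySem.List.sorted ((PySem.List.enumerate Q).map φ) pvKey4 with hqs4
  have hlen : qs4.length = Q.length := by
    rw [hqs4, PySem.List.length_sorted, List.length_map, PySem.List.length_enumerate]
  have hφeval : ∀ (k : Nat) (hk : k < Q.length), φ ((0 : Int) + (k : Int), Q[k])
      = (pvW (Q.getD k []), pvE0 (Q.getD k []), pvE1 (Q.getD k []), (k : Int)) := by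
    intro k hk
    have hget : Q.getD k [] = Q[k] := List.getD_eq_getElem Q [] hk
    have h3 := pvLen3 Q[k] (hq _ (List.getElem_mem hk))
    rw [hφ]
    simp only [hget]
    conv_lhs => rw [h3]
    simp
  have helem : ∀ t ∈ qs4, ∃ k, k < Q.length ∧
      t = (pvW (Q.getD k []), pvE0 (Q.getD k []), pvE1 (Q.getD k []), (k : Int)) := by
    intro t ht
    rw [hqs4, PySem.List.mem_sorted] at ht
    rcases List.mem_map.mp ht with ⟨pr, hpr, rfl⟩
    rcases (PySem.List.mem_enumerate_iff _ _ _).mp hpr with ⟨k, hk, rfl⟩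
    exact ⟨k, hk, hφeval k hk⟩
  have hcover : ∀ m, (hm : m < Q.length) →
      (pvW (Q.getD m []), pvE0 (Q.getD m []), pvE1 (Q.getD m []), (m : Int)) ∈ qs4 := by
    intro m hm
    rw [hqs4, PySem.List.mem_sorted]
    refine List.mem_map.mpr ⟨((0 : Int) + (m : Int), Q[m]), ?_, hφeval m hm⟩
    exact (PySem.List.mem_enumerate_iff _ _ _).mpr ⟨m, hm, rfl⟩
  have hpair : qs4.Pairwise (fun a b => a.1 ≤ b.1) :=
    (PySem.List.sorted_pairwise (xs := (PySem.List.enumerate Q).map φ) (key := pvKey4)).imp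
      (fun h => pvKey4_le _ _ h)
  have hloop := pvALoop el qs4 0 PySem.Dict.empty (List.replicate qs4.length false)
    hpair (fun t _ j hj => absurd hj (Nat.not_lt_zero j)) (Nat.zero_le _)
    (by simpa [pvFEdges] using UFInv_empty)
  rw [hloop]
  have hsetlen := pvFoldlSet_length qs4 (List.replicate qs4.length false)
    (fun t => pvAns el t.1 t.2.1 t.2.2.1)
  have hset := pvFoldlSet (fun t => pvAns el t.1 t.2.1 t.2.2.1)
    (fun k => pvAns el (pvW (Q.getD k [])) (pvE0 (Q.getD k [])) (pvE1 (Q.getD k [])))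
    qs4 (List.replicate qs4.length false)
    (fun t ht => by
      obtain ⟨k, hk, rfl⟩ := helem t ht
      exact ⟨k, by simpa [hlen] using hk, rfl, rfl⟩)
  apply List.ext_getElem?
  intro m
  rcases Nat.lt_or_ge m Q.length with hm | hm
  · rw [hset m, if_pos ⟨_, hcover m hm, by simp⟩]
    rw [List.getElem?_map, List.getElem?_eq_getElem hm]
    simp [List.getD, List.getElem?_eq_getElem hm]
  · have hL : (List.foldl (fun res t => res.set t.2.2.2.toNat (pvAns el t.1 t.2.1 t.2.2.1))
        (List.replicate qs4.length false) qs4).length = Q.length := by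
      have := pvFoldlSet_length qs4 (List.replicate qs4.length false)
        (fun t => pvAns el t.1 t.2.1 t.2.2.1)
      simpa [hlen] using this
    rw [List.getElem?_eq_none (by rw [hL]; exact hm), List.getElem?_eq_none (by simpa using hm)]

-- ===== VERDICT (by name: the statement is the Claim_ definition above) =====
theorem distanceLimitedPathsExist_spec : Claim_equal_distanceLimitedPathsExist := by
  intro n edgeList queries _ hpre
  unfold Spec_distanceLimitedPathsExist
  rw [pvA_eq n edgeList queries hpre.2, pvB_eq n edgeList queries]
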